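-- pv_equiv track=rewrite | github.com/kyle-weng/CS-1-Coursework | midterm.py | display_board_sums
-- ===== SOURCE A (Python) =====
-- def board_sums(board):
--     '''
--     Takes a Life board and returns a new list of lists containing the neighbor
--     sums.
--     '''
--     def wrap_around(n, dimension_length):
--         if n < 0:
--             return n + dimension_length
--         elif n >= dimension_length:
--             return n - dimension_length
--         else:
--             return n
--     nrows = len(board)
--     ncols = len(board[0])
--     outer_list = []
--     for x in range (0, nrows, 1):
--         inner_list = []
--         for y in range (0, ncols, 1):
--             neighbor_indices = [(x - 1, y + 1), (x, y + 1), (x + 1, y + 1),\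
--                                 (x - 1, y), (x + 1, y),\
--                                 (x - 1, y - 1), (x, y - 1), (x + 1, y - 1)]
--             neighbor_sum = 0
--             for index_tuple in neighbor_indices:
--                 neighbor_sum += board[wrap_around(index_tuple[0], nrows)]\
--                 [wrap_around(index_tuple[1], ncols)]
--             inner_list.append(neighbor_sum)
--         outer_list.append(inner_list)
--     return outer_list
--
-- def display_board_sums(board):
--     '''
--     Takes a Life board and displays a board containing the original Life board's
--     neighbor sums.
--     '''
--     neighbor_sums_board = board_sums(board)
--     nrows = len(neighbor_sums_board)
--     ncols = len(neighbor_sums_board[0])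
--     display_string = '+' + ncols * '-' + '+\n'
--     for x in range (0, nrows, 1):
--         display_addend = '|'
--         for y in range (0, ncols, 1):
--             display_addend += str(neighbor_sums_board[x][y])
--         display_addend += '|\n'
--         display_string += display_addend
--     display_string += '+' + ncols * '-' + '+\n'
--     return display_string
-- ===== SOURCE B (Python) =====
-- def display_board_sums(board):
--     nr = len(board)
--     nc = len(board[0])
--     # separable box sum: horizontal 3-sums per row, then vertical 3-sum minus center
--     H = [[row[(y - 1) % nc] + row[y] + row[(y + 1) % nc] for y in range(nc)]
--          for row in board]
--     lines = []
--     for x in range(nr):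
--         up, mid, down = H[(x - 1) % nr], H[x], H[(x + 1) % nr]
--         lines.append('|' + ''.join(str(up[y] + mid[y] + down[y] - board[x][y])
--                                    for y in range(nc)) + '|\n')
--     border = '+' + '-' * nc + '+\n'
--     return border + ''.join(lines) + border
-- ===== Notes on version B (the rewrite author's own statement) =====
-- stated objective: faster
-- what changed: Replaces the per-cell gathering of 8 wrapped neighbor offsets (list of tuples rebuilt and looped over per cell) by a separable 3x3 box sum: a horizontal 3-sum table per row, then vertical 3-sum minus the center; rendering joins per-row strings instead of accumulating one growing string.
import Mathlib
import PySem

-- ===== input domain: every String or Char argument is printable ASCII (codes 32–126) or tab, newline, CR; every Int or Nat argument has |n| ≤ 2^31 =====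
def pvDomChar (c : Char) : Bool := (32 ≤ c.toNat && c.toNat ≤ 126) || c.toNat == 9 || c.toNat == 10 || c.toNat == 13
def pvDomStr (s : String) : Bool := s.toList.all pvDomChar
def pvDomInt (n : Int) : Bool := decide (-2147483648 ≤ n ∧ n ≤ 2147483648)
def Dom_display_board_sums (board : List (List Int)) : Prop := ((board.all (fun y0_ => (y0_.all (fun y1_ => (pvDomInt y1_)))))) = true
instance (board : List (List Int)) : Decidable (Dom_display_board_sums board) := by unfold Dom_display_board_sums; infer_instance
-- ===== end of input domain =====

-- B replaces the 8-offset neighbor gathering by a separable 3x3 box sum minus the center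
-- and joins per-row strings instead of accumulating one growing string; same rendered output.

-- ===== PORT A =====
-- Python strings are ported as List Char (wrapped to String at the end); str(n) is PySem.Int.toChars.
def pvWrapA (n L : Int) : Int := if n < 0 then n + L else if n ≥ L then n - L else n

-- board[i][j] (in range under Pre_; the default is never read there)
def pvGetA (board : List (List Int)) (i j : Int) : Int :=
  PySem.List.pyGetD (PySem.List.pyGetD board i []) j 0

def pvBoardSums (board : List (List Int)) : List (List Int) :=
  let nrows : Int := board.length
  let ncols : Int := (PySem.List.pyGetD board 0 []).length
  (PySem.List.pyRange 0 nrows 1).foldl (fun outer x =>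
    outer ++ [(PySem.List.pyRange 0 ncols 1).foldl (fun inner y =>
      inner ++ [([(x-1,y+1),(x,y+1),(x+1,y+1),(x-1,y),(x+1,y),(x-1,y-1),(x,y-1),(x+1,y-1)].foldl
        (fun s t => s + pvGetA board (pvWrapA t.1 nrows) (pvWrapA t.2 ncols)) 0)]) []]) []

def display_board_sums (board : List (List Int)) : String :=
  let nsb := pvBoardSums board
  let nrows : Int := nsb.length
  let ncols : Int := (PySem.List.pyGetD nsb 0 []).length
  let border : List Char := '+' :: (List.replicate ncols.toNat '-' ++ ['+', '\n'])
  let body := (PySem.List.pyRange 0 nrows 1).foldl (fun ds x =>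
    ds ++ (((PySem.List.pyRange 0 ncols 1).foldl (fun ad y =>
      ad ++ PySem.Int.toChars (pvGetA nsb x y)) ['|']) ++ ['|', '\n'])) border
  String.ofList (body ++ border)

-- ===== PORT B =====
def pvGetB (row : List Int) (j : Int) : Int := PySem.List.pyGetD row j 0
def pvRowB (board : List (List Int)) (i : Int) : List Int := PySem.List.pyGetD board i []

def display_board_sums_alt (board : List (List Int)) : String :=
  let nr : Int := board.length
  let nc : Int := (pvRowB board 0).length
  let H : List (List Int) := board.map (fun row =>
    (PySem.List.pyRange 0 nc 1).map (fun y =>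
      pvGetB row (PySem.Int.mod (y-1) nc) + pvGetB row y + pvGetB row (PySem.Int.mod (y+1) nc)))
  let lines : List (List Char) := (PySem.List.pyRange 0 nr 1).map (fun x =>
    let up := pvRowB H (PySem.Int.mod (x-1) nr)
    let mid := pvRowB H x
    let down := pvRowB H (PySem.Int.mod (x+1) nr)
    '|' :: (((PySem.List.pyRange 0 nc 1).map (fun y =>
      PySem.Int.toChars (pvGetB up y + pvGetB mid y + pvGetB down y - pvGetB (pvRowB board x) y))).flatten ++ ['|', '\n']))
  let border : List Char := '+' :: (List.replicate nc.toNat '-' ++ ['+', '\n'])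
  String.ofList (border ++ lines.flatten ++ border)

-- ===== PRECONDITION & SPEC =====
-- Pre_ excludes exactly the inputs where the Python A raises IndexError: the empty board
-- (board[0]) and ragged boards with some row shorter than the first (board[r][j] out of range).
def Pre_display_board_sums (board : List (List Int)) : Prop :=
  board ≠ [] ∧ ∀ row ∈ board, (board.headD []).length ≤ row.length
instance (board : List (List Int)) : Decidable (Pre_display_board_sums board) := by
  unfold Pre_display_board_sums; infer_instance
def pvWitness_display_board_sums : List (List Int) := [[1, 2], [3, 4]]

def Spec_display_board_sums (board : List (List Int)) (out : String) : Prop := out = display_board_sums_alt board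
instance (board : List (List Int)) (out : String) : Decidable (Spec_display_board_sums board out) := by unfold Spec_display_board_sums; infer_instance

-- ===== CLAIM (what is proved, stated in full; the proofs are below) =====
def Claim_equal_display_board_sums : Prop := ∀ (board : List (List Int)), Dom_display_board_sums board → Pre_display_board_sums board → Spec_display_board_sums board (display_board_sums board)

-- ===== LEMMAS AND PROOFS =====

-- a foldl that appends one block per element is a flatten of a map
theorem pvFoldlFlatten {α β : Type} (l : List α) (f : α → List β) (init : List β) :
    l.foldl (fun acc x => acc ++ f x) init = init ++ (l.map f).flatten := by
  induction l generalizing init with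
  | nil => simp
  | cons a t ih => simp [List.foldl_cons, ih, List.append_assoc]

-- a foldl that appends one singleton per element is a map
theorem pvFoldlMap {α β : Type} (l : List α) (f : α → β) (init : List β) :
    l.foldl (fun acc x => acc ++ [f x]) init = init ++ l.map f := by
  induction l generalizing init with
  | nil => simp
  | cons a t ih => simp [List.foldl_cons, ih]


theorem pvModRange (n L : Int) (_hL : 0 < L) (h0 : -L ≤ n) (h1 : n < L) :
    n % L = if n < 0 then n + L else n := by
  split_ifs with h
  · have hs := Int.sub_emod_right (n + L) L
    have h2 : n % L = (n + L) % L := by rw [← hs]; ring_nf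
    rw [h2, Int.emod_eq_of_lt (by omega) (by omega)]
  · exact Int.emod_eq_of_lt (by omega) h1

theorem pvWrap_sub_one (x L : Int) (h0 : 0 ≤ x) (h1 : x < L) :
    pvWrapA (x - 1) L = PySem.Int.mod (x - 1) L := by
  rw [PySem.Int.mod_eq_emod_of_pos (by omega), pvModRange (x-1) L (by omega) (by omega) (by omega)]
  unfold pvWrapA; split_ifs <;> omega

theorem pvWrap_add_one (x L : Int) (h0 : 0 ≤ x) (h1 : x < L) :
    pvWrapA (x + 1) L = PySem.Int.mod (x + 1) L := by
  rcases eq_or_lt_of_le (by omega : x + 1 ≤ L) with h | h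
  · rw [PySem.Int.mod_eq_emod_of_pos (by omega), h, Int.emod_self]
    unfold pvWrapA; split_ifs <;> omega
  · rw [PySem.Int.mod_eq_emod_of_pos (by omega), pvModRange (x+1) L (by omega) (by omega) h]
    unfold pvWrapA; split_ifs <;> omega

theorem pvWrap_self (x L : Int) (h0 : 0 ≤ x) (h1 : x < L) : pvWrapA x L = x := by
  unfold pvWrapA; split_ifs <;> omega

-- ===== VERDICT (by name: the statement is the Claim_ definition above) =====
-- the per-cell equality: A's 8 wrapped lookups = B's separable box sum minus the center
-- the horizontal 3-sum row (B's H rows), as a named proof helper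
def pvHrow (nc : Int) (row : List Int) : List Int :=
  (PySem.List.pyRange 0 nc 1).map (fun y =>
    pvGetB row (PySem.Int.mod (y-1) nc) + pvGetB row y + pvGetB row (PySem.Int.mod (y+1) nc))

-- the per-cell equality: A's 8 wrapped lookups = B's separable box sum minus the center
theorem pvCellEq (board : List (List Int)) (x y : Int)
    (hx0 : 0 ≤ x) (hx1 : x < (board.length : Int))
    (hy0 : 0 ≤ y) (hy1 : y < ((PySem.List.pyGetD board 0 []).length : Int))
    (hbs : pvBoardSums board =
      (PySem.List.pyRange 0 (board.length : Int) 1).map (fun x =>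
        (PySem.List.pyRange 0 ((PySem.List.pyGetD board 0 []).length : Int) 1).map (fun y =>
          [(x-1,y+1),(x,y+1),(x+1,y+1),(x-1,y),(x+1,y),(x-1,y-1),(x,y-1),(x+1,y-1)].foldl
            (fun s t => s + pvGetA board (pvWrapA t.1 (board.length : Int))
              (pvWrapA t.2 ((PySem.List.pyGetD board 0 []).length : Int))) 0))) :
    pvGetA (pvBoardSums board) x y =
      pvGetB (PySem.List.pyGetD (board.map (fun row => pvHrow ((PySem.List.pyGetD board 0 []).length : Int) row))
          (PySem.Int.mod (x-1) (board.length : Int)) []) y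
      + pvGetB (PySem.List.pyGetD (board.map (fun row => pvHrow ((PySem.List.pyGetD board 0 []).length : Int) row)) x []) y
      + pvGetB (PySem.List.pyGetD (board.map (fun row => pvHrow ((PySem.List.pyGetD board 0 []).length : Int) row))
          (PySem.Int.mod (x+1) (board.length : Int)) []) y
      - pvGetB (PySem.List.pyGetD board x []) y := by
  have hnr : (0:Int) < (board.length : Int) := by omega
  have ha0 := PySem.Int.mod_nonneg (x-1) hnr
  have ha1 := PySem.Int.mod_lt (x-1) hnr
  have hb0 := PySem.Int.mod_nonneg (x+1) hnr
  have hb1 := PySem.Int.mod_lt (x+1) hnr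
  -- left side: the eight wrapped lookups, wraps rewritten to Python mod
  rw [pvGetA, hbs,
    PySem.List.pyGetD_map_pyRange_of_nonneg _ _ _ _ hx0 hx1,
    PySem.List.pyGetD_map_pyRange_of_nonneg _ _ _ _ hy0 hy1]
  simp only [List.foldl_cons, List.foldl_nil]
  rw [pvWrap_sub_one x _ hx0 hx1, pvWrap_add_one x _ hx0 hx1, pvWrap_self x _ hx0 hx1,
    pvWrap_sub_one y _ hy0 hy1, pvWrap_add_one y _ hy0 hy1, pvWrap_self y _ hy0 hy1]
  -- right side: rows of H are the horizontal 3-sums of the corresponding board rows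
  rw [PySem.List.pyGetD_eq_getElem _ _ ha0 (by simpa using ha1),
    PySem.List.pyGetD_eq_getElem _ _ hx0 (by simpa using hx1),
    PySem.List.pyGetD_eq_getElem _ _ hb0 (by simpa using hb1)]
  simp only [List.getElem_map, pvHrow]
  rw [pvGetB, pvGetB, pvGetB,
    PySem.List.pyGetD_map_pyRange_of_nonneg _ _ _ _ hy0 hy1,
    PySem.List.pyGetD_map_pyRange_of_nonneg _ _ _ _ hy0 hy1,
    PySem.List.pyGetD_map_pyRange_of_nonneg _ _ _ _ hy0 hy1]
  -- express A's row lookups through getElem as well, then pure ring arithmetic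
  simp only [pvGetA, pvGetB,
    PySem.List.pyGetD_eq_getElem board _ ha0 (by simpa using ha1),
    PySem.List.pyGetD_eq_getElem board _ hx0 (by simpa using hx1),
    PySem.List.pyGetD_eq_getElem board _ hb0 (by simpa using hb1)]
  ring

theorem display_board_sums_spec : Claim_equal_display_board_sums := by
  intro board _hdom hpre
  obtain ⟨hne, _hrows⟩ := hpre
  have hnr0 : 0 < (board.length : Int) := by
    cases board with
    | nil => exact absurd rfl hne
    | cons a t => simp
  have hnc0 : (0:Int) ≤ ((PySem.List.pyGetD board 0 []).length : Int) := by positivity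
  -- A's sums board as a map of maps
  have hbs : pvBoardSums board =
      (PySem.List.pyRange 0 (board.length : Int) 1).map (fun x =>
        (PySem.List.pyRange 0 ((PySem.List.pyGetD board 0 []).length : Int) 1).map (fun y =>
          [(x-1,y+1),(x,y+1),(x+1,y+1),(x-1,y),(x+1,y),(x-1,y-1),(x,y-1),(x+1,y-1)].foldl
            (fun s t => s + pvGetA board (pvWrapA t.1 (board.length : Int))
              (pvWrapA t.2 ((PySem.List.pyGetD board 0 []).length : Int))) 0)) := by
    unfold pvBoardSums
    simp only [pvFoldlMap, List.nil_append]
  have hlen : ((pvBoardSums board).length : Int) = (board.length : Int) := by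
    rw [hbs]; simp [PySem.List.length_pyRange_one]
  have hfirstlen : ((PySem.List.pyGetD (pvBoardSums board) 0 []).length : Int)
      = ((PySem.List.pyGetD board 0 []).length : Int) := by
    rw [hbs, PySem.List.pyGetD_map_pyRange_of_nonneg _ _ _ _ le_rfl hnr0]
    simp [PySem.List.length_pyRange_one]
  unfold Spec_display_board_sums display_board_sums display_board_sums_alt pvRowB
  simp only [pvFoldlFlatten, hlen, hfirstlen]
  apply congrArg String.ofList
  congr 1
  congr 1
  apply congrArg List.flatten
  apply List.map_congr_left
  intro x hx
  rw [PySem.List.mem_pyRange_one] at hx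
  have hm : List.map (fun yy => PySem.Int.toChars (pvGetA (pvBoardSums board) x yy))
        (PySem.List.pyRange 0 ((PySem.List.pyGetD board 0 []).length : Int) 1)
      = List.map (fun yy => PySem.Int.toChars (
          pvGetB (PySem.List.pyGetD (board.map (fun row => pvHrow ((PySem.List.pyGetD board 0 []).length : Int) row))
            (PySem.Int.mod (x-1) (board.length : Int)) []) yy
        + pvGetB (PySem.List.pyGetD (board.map (fun row => pvHrow ((PySem.List.pyGetD board 0 []).length : Int) row)) x []) yy
        + pvGetB (PySem.List.pyGetD (board.map (fun row => pvHrow ((PySem.List.pyGetD board 0 []).length : Int) row))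
            (PySem.Int.mod (x+1) (board.length : Int)) []) yy
        - pvGetB (PySem.List.pyGetD board x []) yy))
        (PySem.List.pyRange 0 ((PySem.List.pyGetD board 0 []).length : Int) 1) :=
    List.map_congr_left (fun yy hy => by
      rw [PySem.List.mem_pyRange_one] at hy
      exact congrArg PySem.Int.toChars (pvCellEq board x yy hx.1 hx.2 hy.1 hy.2 hbs))
  rw [hm]
  simp only [pvHrow, List.cons_append, List.nil_append]
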